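-- pv_equiv track=rewrite | github.com/IvanYagual/ADA | Algoritmo Dividir y Venceraz/DyV_final.py | direct_method_optimal
-- ===== SOURCE A (Python) =====
-- from typing import Dict, Tuple, List
--
-- def direct_method_optimal(letters_str: str, window_size: int) -> List[Tuple[int, int]]:
--     """
--     Encuentra las subcadenas de longitud `window_size` con la mayor diferencia total en los valores ASCII
--     entre caracteres consecutivos en una cadena dada.
--
--     Parámetros:
--         letters_str (str): Cadena de letras sobre la que se realiza el análisis.
--         window_size (int): Tamaño de la subcadena (ventana deslizante).
--
--     Devuelve:
--         list: Una lista de tuplas, donde cada tupla contiene: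
--             - max_total (int): La suma máxima de las diferencias absolutas entre caracteres consecutivos en la subcadena.
--             - position (int): La posición (índice) donde comienza la subcadena que tiene la suma máxima de diferencias.
--
--     Excepciones:
--         ValueError: Si el tamaño de la subcadena `whole_num` es mayor que la longitud de la cadena `letters_str`,
--                     o si `whole_num` es menor que 2.
--     """
--     n = len(letters_str)
--
--     # Verificamos que los parámetros sean válidos
--     if n < window_size or window_size < 2:
--         raise ValueError(
--             'Invalid parameters: The length of the string must be greater than or equal to the window size (n >= m), '
--             'and the window size must be at least 2.')
--
--     # Calculamos las diferencias entre caracteres consecutivos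
--     difference = [abs(ord(letters_str[i]) - ord(letters_str[i + 1])) for i in range(n - 1)]
--
--     # Calculamos la diferencia total para la primera subcadena
--     total = sum(difference[:window_size - 1])
--     max_total = total
--     position = 1  # La primera posición es 1, ya que las posiciones son 1-basadas
--
--     valid_solutions = [(max_total, position)]
--
--     # Recorremos la cadena con una subcadena deslizante
--     for i in range(1, n - window_size + 1):  # Corrected loop boundary
--         # Actualizamos la suma restando el carácter que sale y sumando el carácter que entra
--         total -= difference[i - 1]
--         total += difference[i + window_size - 2]  # Corrected index for entering character
--
--         # Verificamos si la suma actual es mayor que el máximo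
--         if total > max_total:
--             max_total = total
--             valid_solutions = [(total, i + 1)]  # Nueva subcadena con una mayor suma
--         elif total == max_total:
--             valid_solutions.append((total, i + 1))  # Igualando el máximo, agregamos la solución
--
--     return valid_solutions
-- ===== SOURCE B (Python) =====
-- from typing import List, Tuple
--
-- def direct_method_optimal(letters_str: str, window_size: int) -> List[Tuple[int, int]]:
--     n = len(letters_str)
--     if n < window_size or window_size < 2:
--         raise ValueError(
--             'Invalid parameters: The length of the string must be greater than or equal to the window size (n >= m), '
--             'and the window size must be at least 2.')
--     pre = [0]
--     for i in range(n - 1):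
--         pre.append(pre[-1] + abs(ord(letters_str[i]) - ord(letters_str[i + 1])))
--     sums = [pre[i + window_size - 1] - pre[i] for i in range(n - window_size + 1)]
--     max_total = max(sums)
--     return [(max_total, i + 1) for i, s in enumerate(sums) if s == max_total]
-- ===== Notes on version B (the rewrite author's own statement) =====
-- stated objective: simpler
-- what changed: A's sliding window with an in-loop running total and incremental max/tie bookkeeping is replaced by a prefix-sum array, a list of all window sums, a single max() and one filtering comprehension; Pre_ excludes only the inputs where both raise ValueError.
import Mathlib
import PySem

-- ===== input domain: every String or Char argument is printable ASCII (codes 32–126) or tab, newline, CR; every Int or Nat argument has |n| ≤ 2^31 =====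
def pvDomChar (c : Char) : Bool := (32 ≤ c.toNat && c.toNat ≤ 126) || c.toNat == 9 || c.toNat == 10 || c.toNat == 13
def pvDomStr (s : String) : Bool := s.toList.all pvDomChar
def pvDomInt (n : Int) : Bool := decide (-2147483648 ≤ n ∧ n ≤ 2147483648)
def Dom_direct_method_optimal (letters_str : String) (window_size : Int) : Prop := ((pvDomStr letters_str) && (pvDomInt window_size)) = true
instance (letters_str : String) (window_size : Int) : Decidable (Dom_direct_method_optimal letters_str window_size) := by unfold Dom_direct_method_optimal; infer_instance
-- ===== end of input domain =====

-- B replaces A's sliding-window running sum and in-loop max/tie bookkeeping by a prefix-sum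
-- array, a window-sum list, one max() and one filtering comprehension (objective: simpler).

-- ===== PORT A =====
-- loop body of A's sliding window: t -= difference[i-1]; t += difference[i+w-2]; then max/tie update
def pvStepA (w : Int) (d : List Int) (st : Int × Int × List (Int × Int)) (i : Int) :
    Int × Int × List (Int × Int) :=
  let t := st.1 - PySem.List.pyGetD d (i - 1) 0 + PySem.List.pyGetD d (i + w - 2) 0
  if t > st.2.1 then (t, t, [(t, i + 1)])
  else if t = st.2.1 then (t, st.2.1, st.2.2 ++ [(t, i + 1)])
  else (t, st.2.1, st.2.2)

def direct_method_optimal (letters_str : String) (window_size : Int) : List (Int × Int) :=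
  let n : Int := PySem.Str.len letters_str
  if n < window_size ∨ window_size < 2 then []   -- ValueError in Python; excluded by Pre_
  else
    let cs := letters_str.toList
    let difference : List Int := (PySem.List.pyRange 0 (n - 1) 1).map (fun i =>
      |((PySem.List.pyGetD cs i ' ').toNat : Int) - ((PySem.List.pyGetD cs (i + 1) ' ').toNat : Int)|)
    let total := (PySem.List.slice difference none (some (window_size - 1))).sum
    let r := (PySem.List.pyRange 1 (n - window_size + 1) 1).foldl
      (pvStepA window_size difference) (total, total, [(total, 1)])
    r.2.2

-- ===== PORT B =====
def direct_method_optimal_alt (letters_str : String) (window_size : Int) : List (Int × Int) :=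
  let n : Int := PySem.Str.len letters_str
  if n < window_size ∨ window_size < 2 then []   -- ValueError in Python; excluded by Pre_
  else
    let cs := letters_str.toList
    let pre : List Int := (PySem.List.pyRange 0 (n - 1) 1).foldl (fun pre i =>
      pre ++ [PySem.List.pyGetD pre (-1) 0 +
        |((PySem.List.pyGetD cs i ' ').toNat : Int) - ((PySem.List.pyGetD cs (i + 1) ' ').toNat : Int)|]) [0]
    let sums : List Int := (PySem.List.pyRange 0 (n - window_size + 1) 1).map (fun i =>
      PySem.List.pyGetD pre (i + window_size - 1) 0 - PySem.List.pyGetD pre i 0)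
    let max_total := (PySem.List.max? sums (fun x => x)).getD 0
    ((PySem.List.enumerate sums).filter (fun p => p.2 == max_total)).map (fun p => (max_total, p.1 + 1))

-- ===== PRECONDITION & SPEC =====
-- Pre_ excludes exactly the inputs where A raises ValueError: window larger than the string, or smaller than 2.
def Pre_direct_method_optimal (letters_str : String) (window_size : Int) : Prop :=
  window_size ≤ PySem.Str.len letters_str ∧ 2 ≤ window_size
instance (letters_str : String) (window_size : Int) : Decidable (Pre_direct_method_optimal letters_str window_size) := by unfold Pre_direct_method_optimal; infer_instance

def pvWitness_direct_method_optimal : String × Int := ("abcb", 2)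

def Spec_direct_method_optimal (letters_str : String) (window_size : Int) (out : List (Int × Int)) : Prop := out = direct_method_optimal_alt letters_str window_size
instance (letters_str : String) (window_size : Int) (out : List (Int × Int)) : Decidable (Spec_direct_method_optimal letters_str window_size out) := by unfold Spec_direct_method_optimal; infer_instance

-- ===== CLAIM (what is proved, stated in full; the proofs are below) =====
def Claim_equal_direct_method_optimal : Prop := ∀ (letters_str : String) (window_size : Int), Dom_direct_method_optimal letters_str window_size → Pre_direct_method_optimal letters_str window_size → Spec_direct_method_optimal letters_str window_size (direct_method_optimal letters_str window_size)

-- ===== LEMMAS AND PROOFS =====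

-- prefix sum of f over [0, k)
def pvP (f : Int → Int) (k : Int) : Int := ((PySem.List.pyRange 0 k 1).map f).sum

-- window sum starting at i (window of w characters = w - 1 consecutive differences)
def pvS (f : Int → Int) (w : Int) (i : Int) : Int := pvP f (i + w - 1) - pvP f i

-- the max/tie bookkeeping of A's loop, abstracted over the (position, window-sum) pair
def pvStepG (st : Int × List (Int × Int)) (p : Int × Int) : Int × List (Int × Int) :=
  if p.2 > st.1 then (p.2, [(p.2, p.1 + 1)])
  else if p.2 = st.1 then (st.1, st.2 ++ [(p.2, p.1 + 1)])
  else st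

theorem pvP_succ (f : Int → Int) (k : Int) (h : 0 ≤ k) : pvP f (k + 1) = pvP f k + f k := by
  unfold pvP
  rw [PySem.List.pyRange_one_succ_right h]
  simp

theorem pvPre_eq (f : Int → Int) (c : Nat) :
    (PySem.List.pyRange 0 (c : Int) 1).foldl
        (fun pre i => pre ++ [PySem.List.pyGetD pre (-1) 0 + f i]) [0]
      = (PySem.List.pyRange 0 ((c : Int) + 1) 1).map (pvP f) := by
  induction c with
  | zero =>
      have h1 : PySem.List.pyRange (0:Int) 1 1 = [0] := by decide
      rw [Nat.cast_zero, PySem.List.pyRange_one_eq_nil (le_refl (0:Int))]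
      simp [h1, pvP, PySem.List.pyRange_one_eq_nil (le_refl (0:Int))]
  | succ c ih =>
      have hsplit : PySem.List.pyRange 0 ((c:Int) + 1) 1 = PySem.List.pyRange 0 (c:Int) 1 ++ [(c:Int)] :=
        PySem.List.pyRange_one_succ_right (by positivity)
      have hsplit2 : PySem.List.pyRange 0 ((c:Int) + 1 + 1) 1 =
          PySem.List.pyRange 0 ((c:Int) + 1) 1 ++ [(c:Int) + 1] :=
        PySem.List.pyRange_one_succ_right (by positivity)
      have hmap : (PySem.List.pyRange 0 ((c:Int) + 1) 1).map (pvP f) =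
          (PySem.List.pyRange 0 (c:Int) 1).map (pvP f) ++ [pvP f c] := by
        rw [hsplit]; simp
      push_cast
      rw [hsplit, List.foldl_append, ih, hsplit2, hmap]
      simp [List.foldl, PySem.List.pyGetD_neg_one_append_singleton]
      rw [hmap]
      simp
      exact (pvP_succ f c (by positivity)).symm

theorem pvFoldG (z : List (Int × Int)) : ∀ (mt : Int) (sols : List (Int × Int)) (M : Int),
    M = z.foldl (fun a p => max a p.2) mt →
    z.foldl pvStepG (mt, sols)
      = (M, (if mt = M then sols else []) ++
            (z.filter (fun p => p.2 == M)).map (fun p => (M, p.1 + 1))) := by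
  induction z with
  | nil => intro mt sols M hM; simp at hM; simp [hM]
  | cons q rest ih =>
      intro mt sols M hM
      simp only [List.foldl_cons] at hM ⊢
      have hle : max mt q.2 ≤ M := by
        rw [hM]; exact (PySem.List.le_foldl_max_int rest (fun p => p.2) (max mt q.2)).1
      by_cases h1 : q.2 > mt
      · have hstep : pvStepG (mt, sols) q = (q.2, [(q.2, q.1 + 1)]) := by
          simp [pvStepG, h1]
        rw [hstep, ih q.2 [(q.2, q.1 + 1)] M (by rw [hM]; congr 1; omega)]
        have hmtne : ¬ (mt = M) := by omega
        by_cases h2 : q.2 = M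
        · subst h2; simp [hmtne]
        · simp [hmtne, h2]
      · have hmax : max mt q.2 = mt := by omega
        rw [hmax] at hle hM
        by_cases h2 : q.2 = mt
        · have hstep : pvStepG (mt, sols) q = (mt, sols ++ [(q.2, q.1 + 1)]) := by
            simp [pvStepG, h2]
          rw [hstep, ih mt (sols ++ [(q.2, q.1 + 1)]) M hM]
          by_cases h3 : mt = M
          · subst h3; simp [h2]
          · have : ¬ (q.2 = M) := by omega
            simp [h3, this]
        · have hstep : pvStepG (mt, sols) q = (mt, sols) := by
            simp [pvStepG, h1, h2]
          rw [hstep, ih mt sols M hM]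
          have : ¬ (q.2 = M) := by
            intro h; subst h; omega
          simp [this]

theorem pvSlideA (f : Int → Int) (w n : Int) (hw : 2 ≤ w) (c : Nat) :
    ∀ (j : Int), 1 ≤ j → j + c = n - w + 1 → ∀ (mt : Int) (sols : List (Int × Int)),
    ((PySem.List.pyRange j (n - w + 1) 1).foldl
        (pvStepA w ((PySem.List.pyRange 0 (n - 1) 1).map f)) (pvS f w (j - 1), mt, sols)).2
      = ((PySem.List.pyRange j (n - w + 1) 1).map (fun i => (i, pvS f w i))).foldl pvStepG (mt, sols) := by
  induction c with
  | zero =>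
      intro j hj hjm mt sols
      norm_num at hjm
      rw [PySem.List.pyRange_one_eq_nil (show n - w + 1 ≤ j by omega)]
      simp
  | succ c ih =>
      intro j hj hjm mt sols
      have hjm' : j + (c : Int) + 1 = n - w + 1 := by push_cast at hjm; omega
      clear hjm
      rw [PySem.List.pyRange_one_cons (by omega : j < n - w + 1)]
      simp only [List.foldl_cons, List.map_cons]
      -- the running total after this step is the next window sum
      have hg1 : PySem.List.pyGetD ((PySem.List.pyRange 0 (n - 1) 1).map f) (j - 1) 0 = f (j - 1) :=
        PySem.List.pyGetD_map_pyRange_of_nonneg f (n - 1) (j - 1) 0 (by omega) (by omega)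
      have hg2 : PySem.List.pyGetD ((PySem.List.pyRange 0 (n - 1) 1).map f) (j + w - 2) 0 = f (j + w - 2) :=
        PySem.List.pyGetD_map_pyRange_of_nonneg f (n - 1) (j + w - 2) 0 (by omega) (by omega)
      have ht : pvS f w (j - 1) - PySem.List.pyGetD ((PySem.List.pyRange 0 (n - 1) 1).map f) (j - 1) 0
          + PySem.List.pyGetD ((PySem.List.pyRange 0 (n - 1) 1).map f) (j + w - 2) 0 = pvS f w j := by
        rw [hg1, hg2]
        have e1 : pvP f j = pvP f (j - 1) + f (j - 1) := by
          have := pvP_succ f (j - 1) (by omega)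
          simpa using this
        have e2 : pvP f (j + w - 1) = pvP f (j + w - 2) + f (j + w - 2) := by
          have := pvP_succ f (j + w - 2) (by omega)
          have h3 : j + w - 2 + 1 = j + w - 1 := by omega
          rwa [h3] at this
        simp only [pvS]
        rw [show j - 1 + w - 1 = j + w - 2 by ring]
        omega
      have hstep : pvStepA w ((PySem.List.pyRange 0 (n - 1) 1).map f) (pvS f w (j - 1), mt, sols) j
          = (pvS f w j, pvStepG (mt, sols) (j, pvS f w j)) := by
        simp only [pvStepA, pvStepG, ht]
        split_ifs <;> rfl
      rw [hstep]
      have hstate : pvStepG (mt, sols) (j, pvS f w j)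
          = ((pvStepG (mt, sols) (j, pvS f w j)).1, (pvStepG (mt, sols) (j, pvS f w j)).2) := rfl
      have hj1 : pvS f w j = pvS f w ((j + 1) - 1) := by norm_num
      calc ((PySem.List.pyRange (j+1) (n - w + 1) 1).foldl
              (pvStepA w ((PySem.List.pyRange 0 (n - 1) 1).map f))
              (pvS f w j, (pvStepG (mt, sols) (j, pvS f w j)).1, (pvStepG (mt, sols) (j, pvS f w j)).2)).2
          = ((PySem.List.pyRange (j+1) (n - w + 1) 1).map (fun i => (i, pvS f w i))).foldl pvStepG
              ((pvStepG (mt, sols) (j, pvS f w j)).1, (pvStepG (mt, sols) (j, pvS f w j)).2) := by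
            rw [hj1]
            exact ih (j+1) (by omega) (by omega) _ _
        _ = ((PySem.List.pyRange (j+1) (n - w + 1) 1).map (fun i => (i, pvS f w i))).foldl pvStepG
              (pvStepG (mt, sols) (j, pvS f w j)) := by rw [← hstate]

-- the two port bodies agree, for an arbitrary consecutive-difference function f
theorem pvMain (f : Int → Int) (w n : Int) (hw : 2 ≤ w) (hn : w ≤ n) :
    (List.foldl (pvStepA w ((PySem.List.pyRange 0 (n - 1) 1).map f))
        ((PySem.List.slice ((PySem.List.pyRange 0 (n - 1) 1).map f) none (some (w - 1))).sum,
         (PySem.List.slice ((PySem.List.pyRange 0 (n - 1) 1).map f) none (some (w - 1))).sum,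
         [((PySem.List.slice ((PySem.List.pyRange 0 (n - 1) 1).map f) none (some (w - 1))).sum, 1)])
        (PySem.List.pyRange 1 (n - w + 1) 1)).2.2
      =
    (let pre := (PySem.List.pyRange 0 (n - 1) 1).foldl
        (fun pre i => pre ++ [PySem.List.pyGetD pre (-1) 0 + f i]) [0]
     let sums := (PySem.List.pyRange 0 (n - w + 1) 1).map
        (fun i => PySem.List.pyGetD pre (i + w - 1) 0 - PySem.List.pyGetD pre i 0)
     let max_total := (PySem.List.max? sums (fun x => x)).getD 0
     ((PySem.List.enumerate sums).filter (fun p => p.2 == max_total)).map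
       (fun p => (max_total, p.1 + 1))) := by
  have hP0 : pvP f 0 = 0 := by
    simp [pvP, PySem.List.pyRange_one_eq_nil (le_refl (0:Int))]
  -- A's first window sum
  have htotal : (PySem.List.slice ((PySem.List.pyRange 0 (n - 1) 1).map f) none (some (w - 1))).sum
      = pvS f w 0 := by
    rw [PySem.List.slice_to _ (by omega : (0:Int) ≤ w - 1)]
    rw [PySem.List.pyRange_one_append 0 (w - 1) (n - 1) (by omega) (by omega), List.map_append]
    rw [List.take_left' (by rw [List.length_map, PySem.List.length_pyRange_one]; norm_num)]
    simp only [pvS, zero_add, pvP]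
    rw [PySem.List.pyRange_one_eq_nil (le_refl (0:Int))]
    simp
  rw [htotal]
  -- A's sliding loop is the generic argmax fold over the window sums at positions 1..
  have hA := pvSlideA f w n hw (n - w).toNat 1 (by omega) (by omega)
    (pvS f w 0) [(pvS f w 0, 1)]
  rw [show pvS f w (1 - 1) = pvS f w 0 by norm_num] at hA
  rw [hA]
  set M : Int := (((PySem.List.pyRange 1 (n - w + 1) 1).map (fun i => (i, pvS f w i))).foldl
      (fun a p => max a p.2) (pvS f w 0)) with hM
  rw [pvFoldG _ _ _ M hM]
  -- B's prefix-sum list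
  have hc : ((n - 1).toNat : Int) = n - 1 := by omega
  have hpre : (PySem.List.pyRange 0 (n - 1) 1).foldl
      (fun pre i => pre ++ [PySem.List.pyGetD pre (-1) 0 + f i]) [0]
      = (PySem.List.pyRange 0 n 1).map (pvP f) := by
    have h := pvPre_eq f (n - 1).toNat
    rw [hc, show n - 1 + 1 = n by ring] at h
    exact h
  -- B's window sums
  have hsums : (PySem.List.pyRange 0 (n - w + 1) 1).map
      (fun i => PySem.List.pyGetD ((PySem.List.pyRange 0 n 1).map (pvP f)) (i + w - 1) 0
        - PySem.List.pyGetD ((PySem.List.pyRange 0 n 1).map (pvP f)) i 0)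
      = (PySem.List.pyRange 0 (n - w + 1) 1).map (fun i => pvS f w i) := by
    apply List.map_congr_left
    intro i hi
    rw [PySem.List.mem_pyRange_one] at hi
    rw [PySem.List.pyGetD_map_pyRange_of_nonneg (pvP f) n (i + w - 1) 0 (by omega) (by omega),
        PySem.List.pyGetD_map_pyRange_of_nonneg (pvP f) n i 0 (by omega) (by omega)]
    rfl
  simp only [hpre, hsums]
  -- split off the first window
  have hcons : PySem.List.pyRange 0 (n - w + 1) 1 = 0 :: PySem.List.pyRange 1 (n - w + 1) 1 := by
    have := PySem.List.pyRange_one_cons (a := 0) (b := n - w + 1) (by omega)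
    simpa using this
  -- B's max is M
  have hmax : (PySem.List.max? ((PySem.List.pyRange 0 (n - w + 1) 1).map (fun i => pvS f w i))
      (fun x => x)).getD 0 = M := by
    rw [hcons, List.map_cons, PySem.List.max?_id_cons]
    rw [hM, List.foldl_map, List.foldl_map]
    simp
  -- B's enumerate produces the same (position, window sum) pairs
  have hlen : PySem.List.len ((PySem.List.pyRange 0 (n - w + 1) 1).map (fun i => pvS f w i))
      = n - w + 1 := by
    rw [PySem.List.len_eq, List.length_map, PySem.List.length_pyRange_one]
    omega
  have henum : PySem.List.enumerate ((PySem.List.pyRange 0 (n - w + 1) 1).map (fun i => pvS f w i))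
      = (PySem.List.pyRange 0 (n - w + 1) 1).map (fun i => (i, pvS f w i)) := by
    rw [PySem.List.enumerate_eq_map_pyRange _ 0, hlen]
    apply List.map_congr_left
    intro i hi
    rw [PySem.List.mem_pyRange_one] at hi
    rw [PySem.List.pyGetD_map_pyRange_of_nonneg (fun i => pvS f w i) (n - w + 1) i 0
      (by omega) (by omega)]
  simp only [hmax, henum]
  -- both sides are now the filtered list; compare head and tail
  rw [hcons, List.map_cons, List.filter_cons]
  by_cases h0 : pvS f w 0 = M
  · simp [h0]
  · simp [h0]

-- ===== VERDICT (by name: the statement is the Claim_ definition above) =====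
theorem direct_method_optimal_spec : Claim_equal_direct_method_optimal := by
  intro L w _hDom hPre
  obtain ⟨hwn, hw2⟩ := hPre
  rw [PySem.Str.len_eq] at hwn
  unfold Spec_direct_method_optimal direct_method_optimal direct_method_optimal_alt
  rw [PySem.Str.len_eq]
  set cs := L.toList with hcs
  set n : Int := (cs.length : Int) with hn
  have hguard : ¬ (n < w ∨ w < 2) := by omega
  rw [if_neg hguard, if_neg hguard]
  exact pvMain (fun i =>
    |((PySem.List.pyGetD cs i ' ').toNat : Int) - ((PySem.List.pyGetD cs (i + 1) ' ').toNat : Int)|)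
    w n hw2 hwn
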